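-- pv_equiv track=rewrite | github.com/sangeetagupta2068/PythonAssignments | first_python_program.py | replace_sub_string
-- ===== SOURCE A (Python) =====
-- def replace_sub_string(value,substring):
--     value = value.split(substring)
--
--     for i in range(2,len(value),2):
--         value[i] = substring + value[i]
--
--     for i in range(1,len(value)-1,2):
--         value[i] = value[i]+value[i+1]
--         value[i+1] = ','
--
--     if(value[len(value)-1] == ','):
--         value[len(value)-1] = ''
--
--     value.insert(1,',')
--     value = ''.join(value)
--     return value
-- ===== SOURCE B (Python) =====
-- def replace_sub_string(value, substring):
--     parts = value.split(substring)
--     groups = [parts[j] + substring + parts[j + 1] if j + 1 < len(parts) else parts[j]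
--               for j in range(1, len(parts), 2)]
--     return parts[0] + ',' + ','.join(groups)
-- ===== Notes on version B (the rewrite author's own statement) =====
-- stated objective: simpler
-- what changed: A mutates the split list in place with two index-stepping loops plus a last-element comma patch and an insert before joining on ''; B builds the kept-occurrence groups directly by pairing parts[1:] two at a time in one comprehension and joins them with ','.
-- intended difference: When the last piece of value.split(substring) is literally ',' and the number of pieces is 1 or even (so that piece survives A's loops), A's final comma-sentinel check mistakes this genuine data for its own separator and erases it (e.g. A('aX,','X') = 'a,'), while B keeps it ('a,,'), which is the intended value since real data should not be dropped. — e.g. on replace_sub_string("aX,", "X"): A returns "a,", B returns "a,,"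
import Mathlib
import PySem

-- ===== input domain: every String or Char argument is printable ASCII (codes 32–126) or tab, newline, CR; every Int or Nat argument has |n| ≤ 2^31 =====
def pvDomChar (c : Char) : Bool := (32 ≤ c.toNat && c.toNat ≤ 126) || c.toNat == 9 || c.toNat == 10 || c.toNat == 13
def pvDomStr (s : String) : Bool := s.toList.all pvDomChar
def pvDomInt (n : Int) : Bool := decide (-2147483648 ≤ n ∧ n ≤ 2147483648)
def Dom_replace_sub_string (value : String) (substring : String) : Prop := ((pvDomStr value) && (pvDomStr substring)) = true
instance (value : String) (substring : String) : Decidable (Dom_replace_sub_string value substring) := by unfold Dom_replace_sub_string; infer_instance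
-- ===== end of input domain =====

-- B replaces A's two in-place index loops, last-element comma patch and insert with one
-- direct pairing pass over the split parts joined by ',' (objective: simpler); A mutates only
-- its own local list, so the equivalence is about the return value.

-- ===== PORT A =====
-- Literal port of A.  The list pipeline is done on code-point lists (PySem.Chars); every
-- loop index produced by pyRange here is nonnegative, so `.toNat` on it is exact.
def replace_sub_string (value : String) (substring : String) : String :=
  match PySem.Chars.split? value.toList substring.toList with
  | none => ""   -- Python str.split raises ValueError (empty separator); excluded by Pre_
  | some xs0 =>
    -- for i in range(2, len(value), 2): value[i] = substring + value[i]
    let xs1 := (PySem.List.pyRange 2 ((xs0.length : Int)) 2).foldl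
      (fun v i => v.set i.toNat (substring.toList ++ PySem.List.pyGetD v i [])) xs0
    -- for i in range(1, len(value)-1, 2): value[i] = value[i]+value[i+1]; value[i+1] = ','
    let xs2 := (PySem.List.pyRange 1 ((xs1.length : Int) - 1) 2).foldl
      (fun v i =>
        let v' := v.set i.toNat (PySem.List.pyGetD v i [] ++ PySem.List.pyGetD v (i + 1) [])
        v'.set (i + 1).toNat [',']) xs1
    -- if value[len(value)-1] == ',': value[len(value)-1] = ''
    let xs3 := if PySem.List.pyGetD xs2 ((xs2.length : Int) - 1) [] = [','] then
        xs2.set (xs2.length - 1) [] else xs2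
    -- value.insert(1, ','); return ''.join(value)
    String.ofList (PySem.Chars.join [] (PySem.List.insert xs3 1 [',']))

-- ===== PORT B =====
-- Literal port of B (Source B): pair parts[1:] two at a time, join the groups with ','.
def replace_sub_string_alt (value : String) (substring : String) : String :=
  match PySem.Chars.split? value.toList substring.toList with
  | none => ""   -- B's value.split('') raises the same ValueError; excluded by Pre_
  | some parts =>
    let groups := (PySem.List.pyRange 1 ((parts.length : Int)) 2).map
      (fun j => if j + 1 < ((parts.length : Int)) then
          PySem.List.pyGetD parts j [] ++ substring.toList ++ PySem.List.pyGetD parts (j + 1) []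
        else PySem.List.pyGetD parts j [])
    String.ofList (PySem.List.pyGetD parts 0 [] ++ [','] ++ PySem.Chars.join [','] groups)

-- ===== PRECONDITION & SPEC =====
-- Python str.split raises ValueError on an empty separator (in A and in B alike).
def Pre_replace_sub_string (value : String) (substring : String) : Prop := substring ≠ ""
instance (value : String) (substring : String) : Decidable (Pre_replace_sub_string value substring) := by unfold Pre_replace_sub_string; infer_instance

def pvWitness_replace_sub_string : String × String := ("abXcdXef", "X")

-- When the last piece of value.split(substring) is literally "," and the number of pieces is
-- 1 or even (so that piece survives A's loops untouched), A's final comma-sentinel check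
-- mistakes this genuine data for its own separator and erases it, while B keeps it; B's is
-- the intended value since real data should not be dropped.
def D_replace_sub_string (value : String) (substring : String) : Prop :=
  (PySem.Chars.splitOn value.toList substring.toList).getLast? = some [','] ∧
    ((PySem.Chars.splitOn value.toList substring.toList).length = 1 ∨
      (PySem.Chars.splitOn value.toList substring.toList).length % 2 = 0)
instance (value : String) (substring : String) : Decidable (D_replace_sub_string value substring) := by unfold D_replace_sub_string; infer_instance

def Spec_replace_sub_string (value : String) (substring : String) (out : String) : Prop := ¬ D_replace_sub_string value substring → out = replace_sub_string_alt value substring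
instance (value : String) (substring : String) (out : String) : Decidable (Spec_replace_sub_string value substring out) := by unfold Spec_replace_sub_string; infer_instance

def pvDiffWitness_replace_sub_string : String × String := ("aX,", "X")
def pvDiffWitnessOut_replace_sub_string : String × String := ("a,", "a,,")

-- ===== CLAIM (what is proved, stated in full; the proofs are below) =====
def Claim_unchanged_replace_sub_string : Prop := ∀ (value : String) (substring : String), Dom_replace_sub_string value substring → Pre_replace_sub_string value substring → Spec_replace_sub_string value substring (replace_sub_string value substring)
def Claim_changed_replace_sub_string : Prop := Dom_replace_sub_string (pvDiffWitness_replace_sub_string.1) (pvDiffWitness_replace_sub_string.2) ∧ Pre_replace_sub_string (pvDiffWitness_replace_sub_string.1) (pvDiffWitness_replace_sub_string.2) ∧ D_replace_sub_string (pvDiffWitness_replace_sub_string.1) (pvDiffWitness_replace_sub_string.2) ∧ replace_sub_string (pvDiffWitness_replace_sub_string.1) (pvDiffWitness_replace_sub_string.2) = pvDiffWitnessOut_replace_sub_string.1 ∧ replace_sub_string_alt (pvDiffWitness_replace_sub_string.1) (pvDiffWitness_replace_sub_string.2) = pvDiffWitnessOut_replace_sub_string.2 ∧ pvDiffWitnessOut_replace_sub_string.1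 ≠ pvDiffWitnessOut_replace_sub_string.2
def Claim_exact_replace_sub_string : Prop := ∀ (value : String) (substring : String), Dom_replace_sub_string value substring → Pre_replace_sub_string value substring → D_replace_sub_string value substring → replace_sub_string value substring ≠ replace_sub_string_alt value substring

-- ===== LEMMAS AND PROOFS =====
def pvPair : List (List Char) → List (List Char)
  | [] => []
  | [a] => [a]
  | a :: b :: r => (a ++ b) :: [','] :: pvPair r
theorem pvRange2_nil (a b : Int) (h : b ≤ a) : PySem.List.pyRange a b 2 = [] := by
  rw [PySem.List.pyRange_of_pos a b (by norm_num)]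
  simp [if_neg (not_lt.mpr h)]
theorem pvRange2_cons (a b : Int) (h : a < b) :
    PySem.List.pyRange a b 2 = a :: PySem.List.pyRange (a + 2) b 2 := by
  rw [PySem.List.pyRange_of_pos a b (by norm_num), PySem.List.pyRange_of_pos (a+2) b (by norm_num)]
  by_cases h2 : a + 2 < b
  · rw [if_pos h, if_pos h2]
    have : ((b - a + 2 - 1) / 2).toNat = ((b - (a+2) + 2 - 1) / 2).toNat + 1 := by omega
    rw [this, List.range_succ_eq_map]
    simp [List.map_map, Function.comp]
    intro k _; ring
  · rw [if_pos h, if_neg h2]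
    have : ((b - a + 2 - 1) / 2).toNat = 1 := by omega
    simp [this, List.range_succ]
theorem pvGetD_at (p : List (List Char)) (a : List Char) (s : List (List Char)) (d : List Char) :
    PySem.List.pyGetD (p ++ a :: s) (p.length : Int) d = a := by
  rw [PySem.List.pyGetD_eq_getElem _ d (by positivity) (by simp)]
  simp
theorem pvSet_at (p : List (List Char)) (a x : List Char) (s : List (List Char)) :
    (p ++ a :: s).set p.length x = p ++ x :: s := by
  induction p with
  | nil => simp
  | cons h t ih => simp [ih]

theorem pvLoop2_go (stop : Int) :
    ∀ (t p : List (List Char)) (start : Int), start = (p.length : Int) →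
    stop = (p.length : Int) + t.length - 1 →
    (PySem.List.pyRange start stop 2).foldl
      (fun v i =>
        let v' := v.set i.toNat (PySem.List.pyGetD v i [] ++ PySem.List.pyGetD v (i + 1) [])
        v'.set (i + 1).toNat [','])
      (p ++ t)
    = p ++ pvPair t := by
  intro t
  induction t using pvPair.induct with
  | case1 => intro p start hs h; subst hs; rw [pvRange2_nil _ _ (by simp at h; omega)]; simp [pvPair]
  | case2 a => intro p start hs h; subst hs; rw [pvRange2_nil _ _ (by simp at h; omega)]; simp [pvPair]
  | case3 a b r ih =>
    intro p start hs h
    subst hs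
    rw [pvRange2_cons _ _ (by simp at h; omega)]
    rw [List.foldl_cons]
    have hgb : PySem.List.pyGetD (p ++ a :: b :: r) ((p.length : Int) + 1) [] = b := by
      have := pvGetD_at (p ++ [a]) b r []
      simpa using this
    have hs2 : (p ++ (a ++ b) :: b :: r).set (p.length + 1) [','] = p ++ (a ++ b) :: [','] :: r := by
      have := pvSet_at (p ++ [a ++ b]) b [','] r
      simpa using this
    have ht1 : ((p.length : Int) + 1).toNat = p.length + 1 := by omega
    simp only [pvGetD_at, hgb, Int.toNat_natCast, pvSet_at, ht1, hs2]
    have hre : p ++ (a ++ b) :: [','] :: r = (p ++ [(a ++ b), [',']]) ++ r := by simp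
    have hlen : ((p ++ [(a ++ b), [',']]).length : Int) = (p.length : Int) + 2 := by first | (simp; omega) | simp | omega
    rw [hre, ← hlen, ih (p ++ [(a ++ b), [',']]) _ rfl (by rw [hlen]; first | (simp at h ⊢; omega) | omega)]
    simp [pvPair]

def pvAfin : List (List Char) → List Char
  | [] => []
  | [a] => if a = [','] then [] else a
  | [a, b] => a ++ b
  | a :: b :: r => a ++ b ++ [','] ++ pvAfin r

theorem pvInsert_one (x : List Char) (s : List (List Char)) (v : List Char) :
    PySem.List.insert (x :: s) 1 v = x :: v :: s := by
  simp [PySem.List.insert, PySem.List.sliceIndices]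

theorem pvPair_length (t : List (List Char)) : (pvPair t).length = t.length := by
  induction t using pvPair.induct with
  | case1 => rfl
  | case2 a => rfl
  | case3 a b r ih => simp [pvPair, ih]

theorem pvGetD_last (w : List (List Char)) (hw : w ≠ []) :
    PySem.List.pyGetD w ((w.length : Int) - 1) [] = w.getLastD [] := by
  have hlen : 0 < w.length := List.length_pos_iff.mpr hw
  rw [PySem.List.pyGetD_of_nonneg _ _ (by omega)]
  rw [show ((w.length : Int) - 1).toNat = w.length - 1 from by omega]
  rw [List.getD_eq_getElem?_getD, ← List.getLast?_eq_getElem?, ← List.getLastD_eq_getLast?]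

-- join [] of the comma-patched pvPair u is pvAfin u
theorem pvFixJoin : ∀ (u : List (List Char)), u ≠ [] →
    PySem.Chars.join []
      (if (pvPair u).getLastD [] = [','] then (pvPair u).set ((pvPair u).length - 1) [] else pvPair u)
    = pvAfin u := by
  intro u
  induction u using pvAfin.induct with
  | case1 => intro hu; cases hu rfl
  | case2 =>
    intro _
    simp [pvPair, pvAfin, PySem.Chars.join_singleton]
  | case3 a ha =>
    intro _
    simp only [pvPair]
    rw [show ([a] : List (List Char)).getLastD [] = a from rfl, if_neg ha,
      PySem.Chars.join_singleton]
    simp [pvAfin, ha]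
  | case4 a b =>
    intro _
    simp only [pvPair, pvAfin]
    norm_num
    rw [PySem.Chars.join_cons_cons, PySem.Chars.join_singleton]
    simp
  | case5 a b r hr ih =>
    intro _
    obtain ⟨c, r', rfl⟩ : ∃ c r', r = c :: r' := by
      cases r with
      | nil => exact absurd rfl hr
      | cons c r' => exact ⟨c, r', rfl⟩
    have hne : pvPair (c :: r') ≠ [] := by
      have h1 := pvPair_length (c :: r')
      intro h
      rw [h] at h1
      simp at h1
    have hP : pvPair (a :: b :: c :: r') = (a ++ b) :: [','] :: pvPair (c :: r') := rfl
    have hA : pvAfin (a :: b :: c :: r') = a ++ b ++ [','] ++ pvAfin (c :: r') := rfl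
    have hWpos : 0 < (pvPair (c :: r')).length := List.length_pos_iff.mpr hne
    have hlast : ((a ++ b) :: [','] :: pvPair (c :: r')).getLastD [] = (pvPair (c :: r')).getLastD [] := by
      cases hp : pvPair (c :: r') with
      | nil => cases hne hp
      | cons x s => simp
    have hjoin : ∀ w : List (List Char), w ≠ [] →
        PySem.Chars.join [] ((a ++ b) :: [','] :: w) = a ++ b ++ [','] ++ PySem.Chars.join [] w := by
      intro w hw
      cases w with
      | nil => cases hw rfl
      | cons x s =>
        rw [PySem.Chars.join_cons_cons, PySem.Chars.join_cons_cons]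
        simp
    rw [hP, hA, hlast]
    by_cases hc : (pvPair (c :: r')).getLastD [] = [',']
    · rw [if_pos hc]
      rw [show ((a ++ b) :: [','] :: pvPair (c :: r')).length - 1
            = (((pvPair (c :: r')).length - 1) + 1) + 1 from by simp; omega]
      rw [List.set_cons_succ, List.set_cons_succ]
      rw [hjoin _ (by
        intro h
        have h2 := congrArg List.length h
        simp [List.length_set] at h2
        exact hne h2)]
      have hrec := ih (by simp)
      rw [if_pos hc] at hrec
      rw [hrec]
    · rw [if_neg hc]
      rw [hjoin _ hne]
      have hrec := ih (by simp)
      rw [if_neg hc] at hrec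
      rw [hrec]

def pvEv (sub : List Char) : List (List Char) → List (List Char)
  | [] => []
  | [a] => [sub ++ a]
  | a :: b :: r => (sub ++ a) :: b :: pvEv sub r

def pvGp (sub : List Char) : List (List Char) → List (List Char)
  | [] => []
  | [a] => [a]
  | a :: b :: r => (a ++ sub ++ b) :: pvGp sub r

-- A's whole tail pipeline (patch + insert + ''-join) on p0 :: pvPair u
theorem pvAssemble (p0 : List Char) (u : List (List Char)) (hu : u ≠ []) :
    PySem.Chars.join [] (PySem.List.insert
      (if PySem.List.pyGetD (p0 :: pvPair u) (((p0 :: pvPair u).length : Int) - 1) [] = [','] then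
        (p0 :: pvPair u).set ((p0 :: pvPair u).length - 1) [] else (p0 :: pvPair u)) 1 [','])
    = p0 ++ [','] ++ pvAfin u := by
  have hne : pvPair u ≠ [] := by
    have h1 := pvPair_length u
    intro h; rw [h] at h1; exact hu (List.length_eq_zero_iff.mp h1.symm)
  have hWpos : 0 < (pvPair u).length := List.length_pos_iff.mpr hne
  rw [pvGetD_last _ (by simp)]
  have hlast : (p0 :: pvPair u).getLastD [] = (pvPair u).getLastD [] := by
    cases hp : pvPair u with
    | nil => cases hne hp
    | cons x s => simp
  rw [hlast]
  rw [show (p0 :: pvPair u).length - 1 = ((pvPair u).length - 1) + 1 from by simp; omega]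
  rw [List.set_cons_succ]
  by_cases hc : (pvPair u).getLastD [] = [',']
  · rw [if_pos hc, pvInsert_one]
    have hne2 : (pvPair u).set ((pvPair u).length - 1) [] ≠ [] := by
      intro h
      have h2 := congrArg List.length h
      simp [List.length_set] at h2
      exact hne h2
    obtain ⟨x, s, hx⟩ : ∃ x s, (pvPair u).set ((pvPair u).length - 1) [] = x :: s := by
      cases hxx : (pvPair u).set ((pvPair u).length - 1) [] with
      | nil => cases hne2 hxx
      | cons x s => exact ⟨x, s, rfl⟩
    rw [hx, PySem.Chars.join_cons_cons, PySem.Chars.join_cons_cons, ← hx]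
    have hfj := pvFixJoin u hu
    rw [if_pos hc] at hfj
    rw [hfj]
    simp
  · rw [if_neg hc, pvInsert_one]
    obtain ⟨x, s, hx⟩ : ∃ x s, pvPair u = x :: s := by
      cases hxx : pvPair u with
      | nil => cases hne hxx
      | cons x s => exact ⟨x, s, rfl⟩
    rw [hx, PySem.Chars.join_cons_cons, PySem.Chars.join_cons_cons, ← hx]
    have hfj := pvFixJoin u hu
    rw [if_neg hc] at hfj
    rw [hfj]
    simp

theorem pvGp_ne_nil (sub : List Char) (a : List Char) (r : List (List Char)) :
    pvGp sub (a :: r) ≠ [] := by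
  cases r with
  | nil => simp [pvGp]
  | cons b r' =>
    cases r' with
    | nil => simp [pvGp]
    | cons c r'' => simp [pvGp]

theorem pvJoinC (s x : List Char) (L : List (List Char)) (hL : L ≠ []) :
    PySem.Chars.join s (x :: L) = x ++ s ++ PySem.Chars.join s L := by
  cases L with
  | nil => cases hL rfl
  | cons y r => exact PySem.Chars.join_cons_cons s x y r

-- outside D_: A's tail equals B's tail
theorem pvAgree (sub : List Char) :
    ∀ (rest : List (List Char)) (a : List Char),
      (rest.length % 2 = 0 → (a :: rest).getLastD [] ≠ [',']) →
      pvAfin (a :: pvEv sub rest) = PySem.Chars.join [','] (pvGp sub (a :: rest)) := by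
  intro rest
  induction rest using pvGp.induct with
  | case1 =>
    intro a h
    have ha : a ≠ [','] := h (by simp)
    simp [pvEv, pvAfin, pvGp, ha, PySem.Chars.join_singleton]
  | case2 b =>
    intro a _
    show pvAfin [a, sub ++ b] = PySem.Chars.join [','] (pvGp sub [a, b])
    rw [show pvGp sub [a, b] = [a ++ sub ++ b] from rfl, PySem.Chars.join_singleton]
    simp [pvAfin]
  | case3 b c r ih =>
    intro a h
    have hA : pvAfin (a :: pvEv sub (b :: c :: r)) = a ++ (sub ++ b) ++ [','] ++ pvAfin (c :: pvEv sub r) := rfl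
    have hG : pvGp sub (a :: b :: c :: r) = (a ++ sub ++ b) :: pvGp sub (c :: r) := rfl
    rw [hA, hG, pvJoinC _ _ _ (pvGp_ne_nil sub c r)]
    rw [ih c (by
      intro hev
      have h2 := h (by simp; omega)
      have h3 : (a :: b :: c :: r).getLastD ([] : List Char) = (c :: r).getLastD [] := by simp
      rw [h3] at h2
      exact h2)]
    simp

-- inside D_ (tail case): B's tail is A's tail with the dropped ',' restored
theorem pvDiffTail (sub : List Char) :
    ∀ (rest : List (List Char)) (a : List Char),
      rest.length % 2 = 0 → (a :: rest).getLastD [] = [','] →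
      PySem.Chars.join [','] (pvGp sub (a :: rest)) = pvAfin (a :: pvEv sub rest) ++ [','] := by
  intro rest
  induction rest using pvGp.induct with
  | case1 =>
    intro a _ hl
    have ha : a = [','] := by simpa using hl
    simp [pvGp, pvEv, pvAfin, ha, PySem.Chars.join_singleton]
  | case2 b =>
    intro a he _
    simp at he
  | case3 b c r ih =>
    intro a he hl
    have hA : pvAfin (a :: pvEv sub (b :: c :: r)) = a ++ (sub ++ b) ++ [','] ++ pvAfin (c :: pvEv sub r) := rfl
    have hG : pvGp sub (a :: b :: c :: r) = (a ++ sub ++ b) :: pvGp sub (c :: r) := rfl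
    rw [hA, hG, pvJoinC _ _ _ (pvGp_ne_nil sub c r)]
    rw [ih c (by simp at he ⊢; omega) (by
      have h3 : (a :: b :: c :: r).getLastD ([] : List Char) = (c :: r).getLastD [] := by simp
      rw [h3] at hl
      exact hl)]
    simp

theorem pvLoop1_go (sub : List Char) (stop : Int) :
    ∀ (t p : List (List Char)) (start : Int), start = (p.length : Int) →
    stop = (p.length : Int) + t.length →
    (PySem.List.pyRange start stop 2).foldl
      (fun v i => v.set i.toNat (sub ++ PySem.List.pyGetD v i [])) (p ++ t)
    = p ++ pvEv sub t := by
  intro t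
  induction t using pvEv.induct with
  | case1 => intro p start hs h; subst hs; rw [pvRange2_nil _ _ (by simp at h; omega)]; simp [pvEv]
  | case2 a =>
    intro p start hs h
    subst hs
    rw [pvRange2_cons _ _ (by simp at h; omega)]
    rw [pvRange2_nil _ _ (by simp at h; omega)]
    simp only [List.foldl_cons, List.foldl_nil, pvGetD_at, Int.toNat_natCast, pvSet_at]
    simp [pvEv]
  | case3 a b r ih =>
    intro p start hs h
    subst hs
    rw [pvRange2_cons _ _ (by simp at h; omega)]
    simp only [List.foldl_cons, pvGetD_at, Int.toNat_natCast, pvSet_at]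
    have hre : p ++ (sub ++ a) :: b :: r = (p ++ [sub ++ a, b]) ++ r := by simp
    have hlen : ((p ++ [sub ++ a, b]).length : Int) = (p.length : Int) + 2 := by
      first | (simp; omega) | simp | omega
    rw [hre, ← hlen, ih (p ++ [sub ++ a, b]) _ rfl (by rw [hlen]; simp at h ⊢; omega)]
    simp [pvEv]

theorem pvGroups_go (sub : List Char) (full : List (List Char)) :
    ∀ (t p : List (List Char)) (start : Int), start = (p.length : Int) →
    full = p ++ t →
    ((PySem.List.pyRange start ((full.length : Int)) 2).map
      (fun j => if j + 1 < ((full.length : Int)) then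
          PySem.List.pyGetD full j [] ++ sub ++ PySem.List.pyGetD full (j + 1) []
        else PySem.List.pyGetD full j []))
    = pvGp sub t := by
  intro t
  induction t using pvGp.induct with
  | case1 =>
    intro p start hs h
    subst hs
    rw [pvRange2_nil _ _ (by rw [h]; simp)]
    simp [pvGp]
  | case2 a =>
    intro p start hs h
    subst hs
    rw [pvRange2_cons _ _ (by rw [h]; simp)]
    rw [pvRange2_nil _ _ (by rw [h]; first | (simp; omega) | simp | omega)]
    subst h
    simp only [List.map_cons, List.map_nil]
    rw [if_neg (by simp)]
    rw [pvGetD_at]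
    rfl
  | case3 a b r ih =>
    intro p start hs h
    subst hs
    rw [pvRange2_cons _ _ (by rw [h]; first | (simp; omega) | simp | omega)]
    subst h
    simp only [List.map_cons]
    rw [if_pos (by first | (simp; omega) | simp | omega)]
    rw [pvGetD_at]
    rw [show PySem.List.pyGetD (p ++ a :: b :: r) ((p.length : Int) + 1) [] = b from by
      have := pvGetD_at (p ++ [a]) b r []
      simpa using this]
    have hre : p ++ a :: b :: r = (p ++ [a, b]) ++ r := by simp
    have hlen : (((p ++ [a, b]).length : Nat) : Int) = (p.length : Int) + 2 := by
      first | (simp; omega) | simp | omega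
    rw [show (p.length : Int) + 2 = (((p ++ [a, b]).length : Nat) : Int) from hlen.symm]
    rw [show pvGp sub (a :: b :: r) = (a ++ sub ++ b) :: pvGp sub r from rfl]
    congr 1
    rw [← ih (p ++ [a, b]) _ rfl (by simp)]

def pvA (sub p0 : List Char) (t : List (List Char)) : List Char :=
  match t with
  | [] => (if p0 = [','] then [] else p0) ++ [',']
  | a :: r => p0 ++ [','] ++ pvAfin (a :: pvEv sub r)

def pvB (sub p0 : List Char) (t : List (List Char)) : List Char :=
  p0 ++ [','] ++ PySem.Chars.join [','] (pvGp sub t)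

theorem pvB_eq (value substring : String) (hsep : substring.toList ≠ [])
    (p0 : List Char) (t : List (List Char))
    (hps : PySem.Chars.splitOn value.toList substring.toList = p0 :: t) :
    replace_sub_string_alt value substring = String.ofList (pvB substring.toList p0 t) := by
  unfold replace_sub_string_alt
  rw [show PySem.Chars.split? value.toList substring.toList
      = some (p0 :: t) from by simp [PySem.Chars.split?, hsep, hps]]
  simp only
  rw [pvGroups_go substring.toList (p0 :: t) t [p0] 1 (by simp) rfl]
  rw [show PySem.List.pyGetD (p0 :: t) 0 [] = p0 from by
    have := pvGetD_at [] p0 t []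
    simpa using this]
  rfl

theorem pvA_eq (value substring : String) (hsep : substring.toList ≠ [])
    (p0 : List Char) (t : List (List Char))
    (hps : PySem.Chars.splitOn value.toList substring.toList = p0 :: t) :
    replace_sub_string value substring = String.ofList (pvA substring.toList p0 t) := by
  unfold replace_sub_string
  rw [show PySem.Chars.split? value.toList substring.toList
      = some (p0 :: t) from by simp [PySem.Chars.split?, hsep, hps]]
  simp only
  cases t with
  | nil =>
    rw [pvRange2_nil 2 (([p0] : List (List Char)).length : Int) (by simp)]
    simp only [List.foldl_nil]
    rw [pvRange2_nil 1 ((([p0] : List (List Char)).length : Int) - 1) (by simp)]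
    simp only [List.foldl_nil]
    rw [show ((([p0] : List (List Char)).length : Int) - 1) = 0 from by simp]
    rw [show PySem.List.pyGetD ([p0] : List (List Char)) 0 [] = p0 from by
      have := pvGetD_at [] p0 [] []
      simpa using this]
    by_cases hc : p0 = [',']
    · rw [if_pos hc]
      norm_num
      rw [pvInsert_one, PySem.Chars.join_cons_cons, PySem.Chars.join_singleton]
      simp [pvA, hc]
    · rw [if_neg hc]
      rw [pvInsert_one, PySem.Chars.join_cons_cons, PySem.Chars.join_singleton]
      simp [pvA, hc]
  | cons a r =>
    -- first loop
    rw [show (p0 :: a :: r) = [p0, a] ++ r from rfl]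
    rw [pvLoop1_go substring.toList (((([p0, a] ++ r : List (List Char))).length : Int))
      r [p0, a] 2 (by simp) (by simp; omega)]
    -- second loop
    rw [show ([p0, a] : List (List Char)) ++ pvEv substring.toList r
        = [p0] ++ (a :: pvEv substring.toList r) from by simp]
    rw [pvLoop2_go ((((([p0] ++ (a :: pvEv substring.toList r) : List (List Char))).length : Int)) - 1)
      (a :: pvEv substring.toList r) [p0] 1 (by simp) (by first | (simp; omega) | simp | omega)]
    -- patch + insert + join
    rw [show ([p0] : List (List Char)) ++ pvPair (a :: pvEv substring.toList r)
        = p0 :: pvPair (a :: pvEv substring.toList r) from by simp]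
    rw [pvAssemble p0 (a :: pvEv substring.toList r) (by simp)]
    rfl

theorem pvMain (value substring : String) (hPre : substring ≠ "")
    (hnD : ¬ D_replace_sub_string value substring) :
    replace_sub_string value substring = replace_sub_string_alt value substring := by
  have hsep : substring.toList ≠ [] := by
    intro hl
    exact hPre (String.toList_inj.mp (by simpa using hl))
  unfold D_replace_sub_string at hnD
  cases hps : PySem.Chars.splitOn value.toList substring.toList with
  | nil =>
    have h2 : PySem.Chars.split? value.toList substring.toList = some [] := by
      simp [PySem.Chars.split?, hsep, hps]
    unfold replace_sub_string replace_sub_string_alt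
    rw [h2]
    rfl
  | cons p0 t =>
    rw [pvA_eq value substring hsep p0 t hps, pvB_eq value substring hsep p0 t hps]
    rw [hps] at hnD
    cases t with
    | nil =>
      have hp0 : p0 ≠ [','] := by
        intro h
        exact hnD ⟨by simp [h], Or.inl (by simp)⟩
      simp [pvA, pvB, pvGp, PySem.Chars.join_nil, hp0]
    | cons a r =>
      have hcond : r.length % 2 = 0 → (a :: r).getLastD [] ≠ [','] := by
        intro he hl
        apply hnD
        constructor
        · rw [List.getLast?_cons_cons]
          obtain ⟨y, hy⟩ : ∃ y, (a :: r).getLast? = some y := by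
            cases hq : (a :: r).getLast? with
            | none => simp [List.getLast?_eq_none_iff] at hq
            | some y => exact ⟨y, rfl⟩
          rw [hy]
          rw [List.getLastD_eq_getLast?, hy] at hl
          simpa using hl
        · right
          simp
          omega
      show String.ofList (pvA substring.toList p0 (a :: r))
          = String.ofList (pvB substring.toList p0 (a :: r))
      rw [show pvA substring.toList p0 (a :: r)
          = p0 ++ [','] ++ pvAfin (a :: pvEv substring.toList r) from rfl]
      rw [show pvB substring.toList p0 (a :: r)
          = p0 ++ [','] ++ PySem.Chars.join [','] (pvGp substring.toList (a :: r)) from rfl]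
      rw [pvAgree substring.toList r a hcond]

-- ===== VERDICT (by name: the statement is the Claim_ definition above) =====
theorem replace_sub_string_spec : Claim_unchanged_replace_sub_string := by
  intro value substring _ hPre
  unfold Spec_replace_sub_string
  intro hnD
  exact pvMain value substring hPre hnD

theorem replace_sub_string_changed : Claim_changed_replace_sub_string := by
  unfold Claim_changed_replace_sub_string
  decide

theorem replace_sub_string_tight : Claim_exact_replace_sub_string := by
  intro value substring _ hPre hD
  have hsep : substring.toList ≠ [] := by
    intro hl
    exact hPre (String.toList_inj.mp (by simpa using hl))
  unfold D_replace_sub_string at hD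
  cases hps : PySem.Chars.splitOn value.toList substring.toList with
  | nil => rw [hps] at hD; simp at hD
  | cons p0 t =>
    rw [hps] at hD
    rw [pvA_eq value substring hsep p0 t hps, pvB_eq value substring hsep p0 t hps]
    intro heq
    have hl := congrArg String.toList heq
    rw [String.toList_ofList, String.toList_ofList] at hl
    cases t with
    | nil =>
      have hp0 : p0 = [','] := by
        obtain ⟨h1, _⟩ := hD
        simpa using h1
      rw [hp0] at hl
      simp [pvA, pvB, pvGp, PySem.Chars.join_nil] at hl
    | cons a r =>
      obtain ⟨h1, h2⟩ := hD
      have heven : r.length % 2 = 0 := by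
        rcases h2 with h2 | h2
        · simp at h2
        · simp at h2; omega
      have hlast : (a :: r).getLastD [] = [','] := by
        rw [List.getLast?_cons_cons] at h1
        rw [List.getLastD_eq_getLast?, h1]
        rfl
      rw [show pvB substring.toList p0 (a :: r)
          = p0 ++ [','] ++ PySem.Chars.join [','] (pvGp substring.toList (a :: r)) from rfl] at hl
      rw [pvDiffTail substring.toList r a heven hlast] at hl
      rw [show pvA substring.toList p0 (a :: r)
          = p0 ++ [','] ++ pvAfin (a :: pvEv substring.toList r) from rfl] at hl
      have hlen := congrArg List.length hl
      simp at hlen
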